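-- pv_equiv track=rewrite | github.com/link222333/pansnpeff | pansnpeff.py | _map_regions_to_segments
-- ===== SOURCE A (Python) =====
-- from collections import defaultdict
--
-- def _map_regions_to_segments(gff_data, seg_coords, seg_to_ref, ref_names):
--     """
--     将基因区域（gene/exon/CDS）映射到对应的GFA片段（判断位置重叠）
--
--     参数：
--         gff_data (dict): 基因结构数据
--         seg_coords (dict): 片段位置（start, end）
--         seg_to_ref (dict): 片段所属参考序列
--         ref_names (set): 参考序列名集合
--
--     返回：
--         dict: 区域-片段映射，结构为{ref_name: {gene_id: {feature_type: {seg_id1, seg_id2, ...}}}}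
--     """
--     # 初始化映射关系（嵌套字典）
--     region_segs = defaultdict(lambda: defaultdict(lambda: defaultdict(set)))
--
--     for ref_name in ref_names:
--         if ref_name not in gff_data:
--             continue  # 跳过无基因结构的参考序列
--
--         # 遍历该参考序列下的所有基因
--         genes = gff_data[ref_name]
--         for gene_id, features in genes.items():
--             # 遍历基因的所有特征（gene/exon/CDS）
--             for feature_type, regions in features.items():
--                 # 遍历每个特征的位置区域
--                 for region in regions:
--                     if len(region) < 2:
--                         continue  # 跳过位置信息不完整的区域
--
--                     # 提取区域的起始和结束位置（GFF是1-based）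
--                     reg_start, reg_end = region[0], region[1]
--
--                     # 寻找与该区域重叠的片段
--                     for seg_id, (seg_start, seg_end) in seg_coords.items():
--                         # 片段必须属于当前参考序列
--                         if seg_to_ref.get(seg_id) != ref_name:
--                             continue
--
--                         # 判断区域（1-based）与片段（0-based）是否重叠
--                         # 转换逻辑：1-based的[reg_start, reg_end] → 0-based的[reg_start-1, reg_end-1]
--                         # 重叠条件：片段结束 >= 区域起始-1 且 片段起始 <= 区域结束-1
--                         if not (seg_end < reg_start - 1 or seg_start > reg_end - 1):
--                             # 记录重叠的片段
--                             region_segs[ref_name][gene_id][feature_type].add(seg_id)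
--
--     return region_segs
-- ===== SOURCE B (Python) =====
-- from collections import defaultdict
--
-- def _map_regions_to_segments(gff_data, seg_coords, seg_to_ref, ref_names):
--     # Group segments by their reference once, so each region only scans
--     # that reference's segments (no per-segment seg_to_ref lookup inside the loop).
--     segs_by_ref = {}
--     for seg_id, (seg_start, seg_end) in seg_coords.items():
--         ref = seg_to_ref.get(seg_id)
--         if ref is not None:
--             segs_by_ref.setdefault(ref, []).append((seg_id, seg_start, seg_end))
--
--     region_segs = defaultdict(lambda: defaultdict(lambda: defaultdict(set)))
--     for ref_name in ref_names:
--         if ref_name not in gff_data: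
--             continue
--         segs = segs_by_ref.get(ref_name, [])
--         for gene_id, features in gff_data[ref_name].items():
--             for feature_type, regions in features.items():
--                 for region in regions:
--                     if len(region) < 2:
--                         continue
--                     lo, hi = region[0] - 1, region[1] - 1
--                     for seg_id, seg_start, seg_end in segs:
--                         if seg_end >= lo and seg_start <= hi:
--                             region_segs[ref_name][gene_id][feature_type].add(seg_id)
--     return region_segs
-- ===== Notes on version B (the rewrite author's own statement) =====
-- stated objective: faster
-- what changed: B builds a one-pass index grouping segments by their reference (replacing A's per-region scan over all segments with a per-segment seg_to_ref lookup), so each region only scans the segments of its own reference.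
import Mathlib
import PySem

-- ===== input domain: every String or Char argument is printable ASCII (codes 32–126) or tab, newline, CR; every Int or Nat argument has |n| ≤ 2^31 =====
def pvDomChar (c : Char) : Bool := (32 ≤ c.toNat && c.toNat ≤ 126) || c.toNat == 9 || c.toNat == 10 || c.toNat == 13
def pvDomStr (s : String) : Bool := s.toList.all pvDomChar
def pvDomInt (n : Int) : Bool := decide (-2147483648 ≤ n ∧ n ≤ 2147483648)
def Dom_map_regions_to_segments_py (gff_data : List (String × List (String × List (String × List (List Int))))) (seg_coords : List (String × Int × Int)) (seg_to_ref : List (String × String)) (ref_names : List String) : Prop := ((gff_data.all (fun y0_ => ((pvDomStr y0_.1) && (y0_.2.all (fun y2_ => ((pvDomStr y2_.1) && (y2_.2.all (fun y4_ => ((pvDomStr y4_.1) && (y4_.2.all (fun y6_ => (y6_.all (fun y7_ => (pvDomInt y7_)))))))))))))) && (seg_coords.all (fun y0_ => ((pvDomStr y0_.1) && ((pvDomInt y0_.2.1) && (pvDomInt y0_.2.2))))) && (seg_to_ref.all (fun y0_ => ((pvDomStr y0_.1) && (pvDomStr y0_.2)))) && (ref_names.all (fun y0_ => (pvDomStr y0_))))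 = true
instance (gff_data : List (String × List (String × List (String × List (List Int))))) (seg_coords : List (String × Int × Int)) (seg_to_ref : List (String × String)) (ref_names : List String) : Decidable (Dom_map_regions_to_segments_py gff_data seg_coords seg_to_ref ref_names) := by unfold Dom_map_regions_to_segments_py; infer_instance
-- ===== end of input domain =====

-- ===== PORT A =====
-- One honest line: B groups segments by reference once, so each region scans only its
-- reference's segments instead of all segments with a per-segment dict lookup (objective: faster).

-- shared helpers: first-match dict lookup and the nested defaultdict add (both Pythons mutate
-- region_segs[ref][gene][ftype].add(sid) identically)
def pvGet {a : Type} (l : List (String × a)) (k : String) : Option a := (PySem.Dict.mk l).get? k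

def pvAddSeg (acc : PySem.Dict String (PySem.Dict String (PySem.Dict String (PySem.Set String))))
    (ref gid ft sid : String) : PySem.Dict String (PySem.Dict String (PySem.Dict String (PySem.Set String))) :=
  acc.modify ref PySem.Dict.empty (fun g =>
    g.modify gid PySem.Dict.empty (fun f =>
      f.modify ft PySem.Set.empty (fun s => PySem.Set.add s sid)))

def pvToLists (d : PySem.Dict String (PySem.Dict String (PySem.Dict String (PySem.Set String)))) :
    List (String × List (String × List (String × List String))) :=
  d.items.map (fun r => (r.1, r.2.items.map (fun g => (g.1, g.2.items))))

def map_regions_to_segments_py (gff_data : List (String × List (String × List (String × List (List Int))))) (seg_coords : List (String × Int × Int)) (seg_to_ref : List (String × String)) (ref_names : List String) : List (String × List (String × List (String × List String))) :=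
  pvToLists <|
    ref_names.foldl (fun acc ref_name =>
      match pvGet gff_data ref_name with
      | none => acc                                   -- ref has no gene structure: continue
      | some genes =>
        genes.foldl (fun acc gf =>
          gf.2.foldl (fun acc fr =>
            fr.2.foldl (fun acc region =>
              match region with
              | reg_start :: reg_end :: _ =>
                seg_coords.foldl (fun acc sc =>
                  if pvGet seg_to_ref sc.1 ≠ some ref_name then acc    -- segment not on this ref
                  else if ¬ (sc.2.2 < reg_start - 1 ∨ sc.2.1 > reg_end - 1) then
                    pvAddSeg acc ref_name gf.1 fr.1 sc.1
                  else acc) acc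
              | _ => acc) acc) acc) acc)              -- len(region) < 2: continue
      PySem.Dict.empty

-- ===== PORT B =====
def map_regions_to_segments_py_alt (gff_data : List (String × List (String × List (String × List (List Int))))) (seg_coords : List (String × Int × Int)) (seg_to_ref : List (String × String)) (ref_names : List String) : List (String × List (String × List (String × List String))) :=
  let segs_by_ref : PySem.Dict String (List (String × Int × Int)) :=
    seg_coords.foldl (fun d sc =>
      (pvGet seg_to_ref sc.1).elim d
        (fun r => d.modify r [] (fun l => l ++ [(sc.1, sc.2.1, sc.2.2)]))) PySem.Dict.empty
  pvToLists <|
    ref_names.foldl (fun acc ref_name =>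
      (pvGet gff_data ref_name).elim acc (fun genes =>
        let segs := segs_by_ref.getD ref_name []
        genes.foldl (fun acc gf =>
          gf.2.foldl (fun acc fr =>
            fr.2.foldl (fun acc region =>
              if region.length < 2 then acc
              else
                -- region[0], region[1] under the length guard: literal non-negative
                -- in-range indices, exactly List.getD
                let lo := region.getD 0 0 - 1
                let hi := region.getD 1 0 - 1
                segs.foldl (fun acc t =>
                  if t.2.2 ≥ lo ∧ t.2.1 ≤ hi then pvAddSeg acc ref_name gf.1 fr.1 t.1
                  else acc) acc) acc) acc) acc))
      PySem.Dict.empty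

-- ===== PRECONDITION & SPEC =====
def Spec_map_regions_to_segments_py (gff_data : List (String × List (String × List (String × List (List Int))))) (seg_coords : List (String × Int × Int)) (seg_to_ref : List (String × String)) (ref_names : List String) (out : List (String × List (String × List (String × List String)))) : Prop := out = map_regions_to_segments_py_alt gff_data seg_coords seg_to_ref ref_names
instance (gff_data : List (String × List (String × List (String × List (List Int))))) (seg_coords : List (String × Int × Int)) (seg_to_ref : List (String × String)) (ref_names : List String) (out : List (String × List (String × List (String × List String)))) : Decidable (Spec_map_regions_to_segments_py gff_data seg_coords seg_to_ref ref_names out) := by unfold Spec_map_regions_to_segments_py; infer_instance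

-- ===== CLAIM (what is proved, stated in full; the proofs are below) =====
def Claim_equal_map_regions_to_segments_py : Prop := ∀ (gff_data : List (String × List (String × List (String × List (List Int))))) (seg_coords : List (String × Int × Int)) (seg_to_ref : List (String × String)) (ref_names : List String), Dom_map_regions_to_segments_py gff_data seg_coords seg_to_ref ref_names → Spec_map_regions_to_segments_py gff_data seg_coords seg_to_ref ref_names (map_regions_to_segments_py gff_data seg_coords seg_to_ref ref_names)

-- ===== LEMMAS AND PROOFS =====

-- the grouping pre-pass of B, characterised per reference: its bucket for r is exactly the
-- seg_coords entries whose seg_to_ref lookup is r, in order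
theorem pv_group_getD (seg_to_ref : List (String × String)) (l : List (String × Int × Int))
    (d : PySem.Dict String (List (String × Int × Int))) (r : String) :
    (l.foldl (fun d sc =>
        (pvGet seg_to_ref sc.1).elim d
          (fun rr => d.modify rr [] (fun L => L ++ [(sc.1, sc.2.1, sc.2.2)]))) d).getD r []
      = d.getD r [] ++
        (l.filter (fun sc => pvGet seg_to_ref sc.1 == some r)).map (fun sc => (sc.1, sc.2.1, sc.2.2)) := by
  induction l generalizing d with
  | nil => simp
  | cons sc l ih =>
    simp only [List.foldl_cons, List.filter_cons]
    cases h : pvGet seg_to_ref sc.1 with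
    | none => simp [ih]
    | some rr =>
      simp only [Option.elim_some]
      rw [ih, PySem.Dict.getD_modify]
      by_cases hr : r = rr
      · subst hr; simp
      · have hr' : ¬ rr = r := fun hh => hr hh.symm
        simp [hr, hr']

-- A's innermost scan over all of seg_coords (skip-other-ref guard, then the overlap test)
-- equals B's scan over the pre-filtered bucket with the positive overlap test
theorem pv_inner {α : Type} (seg_to_ref : List (String × String)) (l : List (String × Int × Int))
    (ref : String) (r0 r1 : Int) (F : α → String → α) (acc : α) :
    l.foldl (fun acc sc =>
        if pvGet seg_to_ref sc.1 ≠ some ref then acc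
        else if ¬ (sc.2.2 < r0 - 1 ∨ sc.2.1 > r1 - 1) then F acc sc.1 else acc) acc
      = ((l.filter (fun sc => pvGet seg_to_ref sc.1 == some ref)).map
          (fun sc => (sc.1, sc.2.1, sc.2.2))).foldl
          (fun acc t => if t.2.2 ≥ r0 - 1 ∧ t.2.1 ≤ r1 - 1 then F acc t.1 else acc) acc := by
  rw [List.foldl_map, List.foldl_filter]
  apply PySem.List.foldl_congr_mem
  intro a sc _
  by_cases h : pvGet seg_to_ref sc.1 = some ref
  · simp only [h, ne_eq, not_true_eq_false, if_false, beq_self_eq_true, if_true]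
    split_ifs with h1 h2 <;> first | rfl | (exfalso; omega)
  · simp [h]

-- ===== VERDICT (by name: the statement is the Claim_ definition above) =====
theorem map_regions_to_segments_py_spec : Claim_equal_map_regions_to_segments_py := by
  intro gff_data seg_coords seg_to_ref ref_names _
  unfold Spec_map_regions_to_segments_py
  simp only [map_regions_to_segments_py, map_regions_to_segments_py_alt]
  congr 1
  apply PySem.List.foldl_congr_mem
  intro acc ref _
  cases hg : pvGet gff_data ref with
  | none => rfl
  | some genes =>
    simp only [Option.elim_some]
    rw [pv_group_getD, PySem.Dict.getD_empty, List.nil_append]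
    apply PySem.List.foldl_congr_mem
    intro acc gf _
    apply PySem.List.foldl_congr_mem
    intro acc fr _
    apply PySem.List.foldl_congr_mem
    intro acc region _
    rcases region with _ | ⟨r0, _ | ⟨r1, rest⟩⟩
    · rfl
    · rfl
    · simp only [List.length_cons, List.getD_cons_zero, List.getD_cons_succ]
      rw [if_neg (by omega)]
      exact pv_inner seg_to_ref seg_coords ref r0 r1 (fun acc sid => pvAddSeg acc ref gf.1 fr.1 sid) acc
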